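-- pv_equiv track=rewrite | github.com/Ulitochka/LLM_based_toxicity_detection_service | model_dev/src/t5/metrics/metrics_tag_soft.py | match_facts
-- ===== SOURCE A (Python) =====
-- def match_facts(gold_facts: set, pred_facts: set, text: str) -> tuple:
--     matched_gold = set()
--     matched_pred = set()
--
--     for g in gold_facts:
--         for p in pred_facts:
--             if g in p or p in g:
--                 matched_gold.add(g)
--                 matched_pred.add(p)
--
--     tp = len(matched_gold)
--     # Новый фильтр: исключаем из fp предсказанные факты, которые >= 2 символов и есть в тексте
--     real_fp = {fact for fact in (pred_facts - matched_pred) if not (len(fact) >= 2 and fact in text)}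
--     fp = len(real_fp)
--     fn = len(gold_facts - matched_gold)
--
--     return tp, fp, fn
-- ===== SOURCE B (Python) =====
-- def match_facts(gold_facts: set, pred_facts: set, text: str) -> tuple:
--     # Single pass over the predictions with a shrinking worklist of still-unmatched
--     # gold facts; fp is accumulated inline, tp/fn are derived from the worklist size.
--     unmatched = list(gold_facts)
--     fp = 0
--     for p in pred_facts:
--         if any(g in p or p in g for g in gold_facts):
--             unmatched = [g for g in unmatched if g not in p and p not in g]
--         elif not (len(p) >= 2 and p in text):
--             fp += 1
--     fn = len(unmatched)
--     return len(gold_facts) - fn, fp, fn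
-- ===== Notes on version B (the rewrite author's own statement) =====
-- stated objective: faster
-- what changed: Replaces A's gold-outer nested loop that builds two matched sets and then takes three set differences by a single pass over the predictions that shrinks a worklist of still-unmatched gold facts and accumulates fp inline; tp and fn are derived from the final worklist length.
import Mathlib
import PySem

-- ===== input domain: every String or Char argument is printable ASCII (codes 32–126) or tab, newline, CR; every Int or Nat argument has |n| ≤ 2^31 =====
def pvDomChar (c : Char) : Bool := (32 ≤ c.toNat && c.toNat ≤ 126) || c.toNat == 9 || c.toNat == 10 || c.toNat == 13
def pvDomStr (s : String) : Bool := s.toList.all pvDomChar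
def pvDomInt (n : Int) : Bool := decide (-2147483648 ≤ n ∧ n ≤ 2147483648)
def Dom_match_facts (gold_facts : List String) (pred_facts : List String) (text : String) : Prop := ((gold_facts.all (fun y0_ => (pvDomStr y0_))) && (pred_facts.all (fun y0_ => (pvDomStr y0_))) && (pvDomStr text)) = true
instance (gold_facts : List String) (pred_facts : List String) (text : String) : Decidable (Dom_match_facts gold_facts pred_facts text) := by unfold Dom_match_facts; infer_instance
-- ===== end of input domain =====

-- B replaces A's nested loop over gold×pred building two matched sets (then three set
-- differences) by one pass over the predictions with a shrinking worklist of unmatched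
-- gold facts and an inline fp counter (measured faster in a timing run: short-circuit + shrinking worklist).


-- ===== PORT A =====
-- for g in gold: for p in pred: if g in p or p in g: add to both matched sets;
-- then tp/fp/fn from set sizes and set differences (set parameters: Set.ofList of the list representation).
def match_facts (gold_facts : List String) (pred_facts : List String) (text : String) : Int × Int × Int :=
  let st := gold_facts.foldl (fun (st : PySem.Set String × PySem.Set String) g =>
      pred_facts.foldl (fun st2 p =>
        if PySem.Str.isIn g p || PySem.Str.isIn p g then
          (st2.1.add g, st2.2.add p)
        else st2) st) (PySem.Set.empty, PySem.Set.empty)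
  let matched_gold := st.1
  let matched_pred := st.2
  let tp : Int := matched_gold.length
  let real_fp : PySem.Set String := PySem.Set.ofList
      (((PySem.Set.ofList pred_facts).diff matched_pred).filter
        (fun fact => !(decide (2 ≤ PySem.Str.len fact) && PySem.Str.isIn fact text)))
  let fp : Int := real_fp.length
  let fn : Int := ((PySem.Set.ofList gold_facts).diff matched_gold).length
  (tp, fp, fn)

-- ===== PORT B =====
-- one pass over pred_facts: matched predictions shrink the worklist of unmatched gold
-- facts, unmatched predictions failing the text filter bump fp; tp/fn from the worklist.
def match_facts_alt (gold_facts : List String) (pred_facts : List String) (text : String) : Int × Int × Int :=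
  let st := pred_facts.foldl (fun (st : List String × Int) p =>
      if gold_facts.any (fun g => PySem.Str.isIn g p || PySem.Str.isIn p g) then
        (st.1.filter (fun g => !PySem.Str.isIn g p && !PySem.Str.isIn p g), st.2)
      else if !(decide (2 ≤ PySem.Str.len p) && PySem.Str.isIn p text) then
        (st.1, st.2 + 1)
      else st) (gold_facts, 0)
  let fn : Int := st.1.length
  ((gold_facts.length : Int) - fn, st.2, fn)

-- ===== PRECONDITION & SPEC =====
-- gold_facts and pred_facts are Python SETS: their list representations hold distinct
-- elements. On duplicate lists the Python A raises (TypeError on list - set), so they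
-- lie outside the natural domain.
def Pre_match_facts (gold_facts : List String) (pred_facts : List String) (text : String) : Prop :=
  gold_facts.Nodup ∧ pred_facts.Nodup
instance (gold_facts : List String) (pred_facts : List String) (text : String) : Decidable (Pre_match_facts gold_facts pred_facts text) := by unfold Pre_match_facts; infer_instance
def pvWitness_match_facts : List String × List String × String := (["ab", "c"], ["b", "zz"], "xy")
def Spec_match_facts (gold_facts : List String) (pred_facts : List String) (text : String) (out : Int × Int × Int) : Prop := out = match_facts_alt gold_facts pred_facts text
instance (gold_facts : List String) (pred_facts : List String) (text : String) (out : Int × Int × Int) : Decidable (Spec_match_facts gold_facts pred_facts text out) := by unfold Spec_match_facts; infer_instance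

-- ===== CLAIM (what is proved, stated in full; the proofs are below) =====
def Claim_equal_match_facts : Prop := ∀ (gold_facts : List String) (pred_facts : List String) (text : String), Dom_match_facts gold_facts pred_facts text → Pre_match_facts gold_facts pred_facts text → Spec_match_facts gold_facts pred_facts text (match_facts gold_facts pred_facts text)

-- ===== LEMMAS AND PROOFS =====

-- A's inner loop: the first component becomes 'add g' exactly when some p matches g
theorem pv_inner_fst (g : String) (ps : List String) (st : PySem.Set String × PySem.Set String) :
    (ps.foldl (fun st2 p => if PySem.Str.isIn g p || PySem.Str.isIn p g then (st2.1.add g, st2.2.add p) else st2) st).1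
      = if ps.any (fun p => PySem.Str.isIn g p || PySem.Str.isIn p g) then st.1.add g else st.1 := by
  induction ps generalizing st with
  | nil => simp
  | cons p ps ih =>
    rw [List.foldl_cons]
    by_cases h : (PySem.Str.isIn g p || PySem.Str.isIn p g) = true
    · rw [if_pos h, ih, List.any_cons, h]
      simp
    · have h' : (PySem.Str.isIn g p || PySem.Str.isIn p g) = false := by simpa using h
      rw [if_neg h, ih, List.any_cons, h', Bool.false_or]

-- A's inner loop: membership in the second component
theorem pv_inner_snd (g : String) (ps : List String) (st : PySem.Set String × PySem.Set String) (x : String) :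
    x ∈ (ps.foldl (fun st2 p => if PySem.Str.isIn g p || PySem.Str.isIn p g then (st2.1.add g, st2.2.add p) else st2) st).2
      ↔ x ∈ st.2 ∨ (x ∈ ps ∧ (PySem.Str.isIn g x || PySem.Str.isIn x g) = true) := by
  induction ps generalizing st with
  | nil => simp
  | cons p ps ih =>
    rw [List.foldl_cons]
    by_cases h : (PySem.Str.isIn g p || PySem.Str.isIn p g) = true
    · rw [if_pos h, ih]
      simp only [PySem.Set.mem_add]
      constructor
      · rintro (⟨hx | rfl⟩ | ⟨hx, hm⟩)
        · exact .inl hx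
        · exact .inr ⟨List.mem_cons_self, h⟩
        · exact .inr ⟨List.mem_cons_of_mem _ hx, hm⟩
      · rintro (hx | ⟨hx, hm⟩)
        · exact .inl (.inl hx)
        · rcases List.mem_cons.1 hx with rfl | hx
          · exact .inl (.inr rfl)
          · exact .inr ⟨hx, hm⟩
    · rw [if_neg h, ih]
      constructor
      · rintro (hx | ⟨hx, hm⟩)
        · exact .inl hx
        · exact .inr ⟨List.mem_cons_of_mem _ hx, hm⟩
      · rintro (hx | ⟨hx, hm⟩)
        · exact .inl hx
        · rcases List.mem_cons.1 hx with rfl | hx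
          · exact absurd hm h
          · exact .inr ⟨hx, hm⟩

-- A's outer loop, first component: equals the fold of Set.add over the matched gold facts
theorem pv_outer_fst (gold ps : List String) (st : PySem.Set String × PySem.Set String) :
    (gold.foldl (fun st g => ps.foldl (fun st2 p => if PySem.Str.isIn g p || PySem.Str.isIn p g then (st2.1.add g, st2.2.add p) else st2) st) st).1
      = (gold.filter (fun g => ps.any (fun p => PySem.Str.isIn g p || PySem.Str.isIn p g))).foldl PySem.Set.add st.1 := by
  induction gold generalizing st with
  | nil => simp
  | cons g gs ih =>
    rw [List.foldl_cons, ih, pv_inner_fst g ps st, List.filter_cons]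
    by_cases h : ps.any (fun p => PySem.Str.isIn g p || PySem.Str.isIn p g) = true
    · rw [if_pos h, if_pos h, List.foldl_cons]
    · rw [if_neg h, if_neg h]

-- A's outer loop, second component: membership characterisation
theorem pv_outer_snd (gold ps : List String) (st : PySem.Set String × PySem.Set String) (x : String) :
    (x ∈ (gold.foldl (fun st g => ps.foldl (fun st2 p => if PySem.Str.isIn g p || PySem.Str.isIn p g then (st2.1.add g, st2.2.add p) else st2) st) st).2)
      ↔ x ∈ st.2 ∨ (x ∈ ps ∧ gold.any (fun g => PySem.Str.isIn g x || PySem.Str.isIn x g) = true) := by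
  induction gold generalizing st with
  | nil => simp
  | cons g gs ih =>
    rw [List.foldl_cons, ih, pv_inner_snd, List.any_cons]
    simp only [Bool.or_eq_true]
    tauto

-- B's single pass: the worklist ends as the gold facts matched by no prediction, and the
-- counter ends as the count of unmatched predictions failing the text filter
theorem pv_alt_fold (gold : List String) (text : String) (ps : List String) (u : List String) (c : Int)
    (hu : ∀ g ∈ u, g ∈ gold) :
    ps.foldl (fun (st : List String × Int) p =>
      if gold.any (fun g => PySem.Str.isIn g p || PySem.Str.isIn p g) then
        (st.1.filter (fun g => !PySem.Str.isIn g p && !PySem.Str.isIn p g), st.2)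
      else if !(decide (2 ≤ PySem.Str.len p) && PySem.Str.isIn p text) then
        (st.1, st.2 + 1)
      else st) (u, c)
    = (u.filter (fun g => !ps.any (fun p => PySem.Str.isIn g p || PySem.Str.isIn p g)),
       c + (ps.countP (fun p => !(gold.any (fun g => PySem.Str.isIn g p || PySem.Str.isIn p g))
              && !(decide (2 ≤ PySem.Str.len p) && PySem.Str.isIn p text)) : Int)) := by
  induction ps generalizing u c with
  | nil => simp
  | cons p ps ih =>
    rw [List.foldl_cons, List.countP_cons]
    by_cases h : (gold.any fun g => PySem.Str.isIn g p || PySem.Str.isIn p g) = true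
    · rw [if_pos h, ih _ c (fun g hg => hu g (List.mem_of_mem_filter hg)),
          List.filter_filter]
      simp only [Prod.mk.injEq]
      refine ⟨?_, ?_⟩
      · apply List.filter_congr
        intro g _
        simp only [List.any_cons, Bool.or_eq_true, Bool.not_or, Bool.and_comm]
      · rw [h]
        simp
    · have h' : (gold.any fun g => PySem.Str.isIn g p || PySem.Str.isIn p g) = false := by
        simpa using h
      have hfilter : u.filter (fun g => !(p :: ps).any fun q => PySem.Str.isIn g q || PySem.Str.isIn q g)
          = u.filter (fun g => !ps.any fun q => PySem.Str.isIn g q || PySem.Str.isIn q g) := by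
        apply List.filter_congr
        intro g hg
        have hgp : (PySem.Str.isIn g p || PySem.Str.isIn p g) = false := by
          have := List.any_eq_false.1 h' g (hu g hg)
          simpa using this
        simp only [List.any_cons, hgp, Bool.false_or]
      rw [if_neg h]
      by_cases hc : (decide (2 ≤ PySem.Str.len p) && PySem.Str.isIn p text) = true
      · rw [if_neg (by rw [hc]; simp), ih u c hu, hfilter, h', hc]
        simp
      · have hc' : (decide (2 ≤ PySem.Str.len p) && PySem.Str.isIn p text) = false := by
          simpa using hc
        rw [if_pos (by rw [hc']; rfl), ih u (c + 1) hu, hfilter, h', hc']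
        simp only [Prod.mk.injEq, true_and, Bool.not_false, Bool.and_self, if_pos]
        push_cast
        ring

-- ===== VERDICT (by name: the statement is the Claim_ definition above) =====
theorem match_facts_spec : Claim_equal_match_facts := by
  intro gold pred text _ hpre
  obtain ⟨hg, hp⟩ := hpre
  show match_facts gold pred text = match_facts_alt gold pred text
  simp only [match_facts, match_facts_alt]
  rw [pv_alt_fold gold text pred gold 0 (fun _ h => h)]
  set M : String → Bool := fun g => pred.any (fun p => PySem.Str.isIn g p || PySem.Str.isIn p g) with hM
  set N : String → Bool := fun p => gold.any (fun g => PySem.Str.isIn g p || PySem.Str.isIn p g) with hN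
  set cond : String → Bool := fun p => decide (2 ≤ PySem.Str.len p) && PySem.Str.isIn p text with hcond
  -- A's matched_gold as a list
  have hMG :
      (gold.foldl (fun st g => pred.foldl (fun st2 p =>
          if PySem.Str.isIn g p || PySem.Str.isIn p g then (st2.1.add g, st2.2.add p) else st2) st)
        (PySem.Set.empty, PySem.Set.empty)).1 = PySem.Set.ofList (gold.filter M) := by
    rw [pv_outer_fst, PySem.Set.ofList_eq_foldl]
    rfl
  have hMPmem : ∀ x,
      (x ∈ (gold.foldl (fun st g => pred.foldl (fun st2 p =>
          if PySem.Str.isIn g p || PySem.Str.isIn p g then (st2.1.add g, st2.2.add p) else st2) st)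
        (PySem.Set.empty, PySem.Set.empty)).2)
        ↔ (x ∈ pred ∧ N x = true) := by
    intro x
    rw [pv_outer_snd]
    simp [PySem.Set.empty, hN, PySem.Str.isIn, List.any_eq_true]
  rw [hMG]
  have hofg : PySem.Set.ofList gold = gold := PySem.Set.ofList_eq_self_of_nodup _ hg
  have hofp : PySem.Set.ofList pred = pred := PySem.Set.ofList_eq_self_of_nodup _ hp
  have hofMG : PySem.Set.ofList (gold.filter M) = gold.filter M :=
    PySem.Set.ofList_eq_self_of_nodup _ (hg.filter _)
  -- tp
  have htp : ((PySem.Set.ofList (gold.filter M)).length : Int)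
      = (gold.length : Int) - ((gold.filter (fun g => !M g)).length : Int) := by
    rw [hofMG]
    have := List.length_eq_length_filter_add (l := gold) M
    have hnot : (gold.filter (fun g => !M g)).length
        = (gold.filter (fun g => decide (¬ M g = true))).length := by
      congr 1
      apply List.filter_congr
      intro g _
      simp
    omega
  -- fn
  have hfn : (PySem.Set.ofList gold).diff (PySem.Set.ofList (gold.filter M))
      = gold.filter (fun g => !M g) := by
    unfold PySem.Set.diff
    rw [hofg, hofMG]
    apply List.filter_congr
    intro g hgm
    congr 1
    apply Bool.coe_iff_coe.mp
    rw [PySem.Set.contains_iff, List.mem_filter]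
    simp [hgm]
  -- fp
  have hdiff : (PySem.Set.ofList pred).diff ((gold.foldl (fun st g => pred.foldl (fun st2 p =>
          if PySem.Str.isIn g p || PySem.Str.isIn p g then (st2.1.add g, st2.2.add p) else st2) st)
        (PySem.Set.empty, PySem.Set.empty)).2)
      = pred.filter (fun p => !N p) := by
    unfold PySem.Set.diff
    rw [hofp]
    apply List.filter_congr
    intro p hpm
    congr 1
    apply Bool.coe_iff_coe.mp
    rw [PySem.Set.contains_iff, hMPmem]
    simp [hpm]
  rw [hdiff, List.filter_filter]
  have hfp : PySem.Set.ofList ((pred.filter fun p => !(cond p) && !N p))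
      = pred.filter (fun p => !(cond p) && !N p) :=
    PySem.Set.ofList_eq_self_of_nodup _ (hp.filter _)
  rw [hfp]
  have hfpc : ((pred.filter fun p => !(cond p) && !N p).length : Int)
      = (pred.countP (fun p => !N p && !(cond p)) : Int) := by
    rw [List.countP_eq_length_filter]
    congr 2
    apply List.filter_congr
    intro p _
    exact Bool.and_comm _ _
  rw [hfpc, hfn, htp]
  simp [hM, hN, hcond, PySem.Str.isIn]
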